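-- pv_equiv track=rewrite | github.com/tora-kozic/advent_of_code | day3/main.py | helper
-- ===== SOURCE A (Python) =====
-- def helper(lines, n, common=True):
--     # split numbers by most common (if common=true) digit in Nth place
--     digit = find_most_common(lines, n)
--     if not common:
--         digit = not digit
--     looking = '1' if digit else '0'
--     # return new list
--     x = []
--     for line in lines:
--         if line[n] == looking:
--             x.append(line)
--     # recurse on new list with n + 1
--     if len(x) == 1:
--         return x[0]
--     return helper(x, n+1, common)
--
-- def find_most_common(lines, n):
--     a = 0
--     l = len(lines)
--     # could stop count early if by value is determined by halfway point
--     for line in lines: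
--         a += int(line[n])
--     return 1 if a >= l/2 else 0
-- ===== SOURCE B (Python) =====
-- def helper(lines, n, common=True):
--     # Iterative reformulation: one while loop filtering in place of the
--     # recursive helper + find_most_common pair; same counting and tie rule.
--     cur = list(lines)
--     i = n
--     while len(cur) > 1:
--         ones = sum(int(line[i]) for line in cur)
--         keep = (ones >= len(cur) / 2) == common
--         looking = '1' if keep else '0'
--         cur = [line for line in cur if line[i] == looking]
--         i += 1
--     return cur[0]
-- ===== Notes on version B (the rewrite author's own statement) =====
-- stated objective: simpler
-- what changed: The recursive helper + separate find_most_common pair is replaced by a single iterative while-loop that counts, filters and advances the bit index in place, returning cur[0] when one line remains.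
-- outside the precondition, e.g. on helper(['10', '11', '00', '00'], 0, True): A returns '11', B returns '11'; on helper(['001', '010', '110', '111'], 0, False): A returns '001', B returns '001'
import Mathlib
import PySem

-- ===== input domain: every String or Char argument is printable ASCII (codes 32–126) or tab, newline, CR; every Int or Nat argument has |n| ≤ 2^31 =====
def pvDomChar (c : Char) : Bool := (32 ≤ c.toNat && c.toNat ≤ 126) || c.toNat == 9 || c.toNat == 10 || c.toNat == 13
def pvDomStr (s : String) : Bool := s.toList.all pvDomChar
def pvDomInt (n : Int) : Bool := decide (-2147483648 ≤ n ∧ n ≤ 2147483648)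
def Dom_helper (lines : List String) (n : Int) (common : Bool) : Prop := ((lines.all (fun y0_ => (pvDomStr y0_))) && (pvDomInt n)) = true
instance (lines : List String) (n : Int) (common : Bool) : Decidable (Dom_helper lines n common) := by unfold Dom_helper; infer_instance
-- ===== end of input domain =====

-- B replaces A's recursive helper + find_most_common pair by one iterative filtering loop (same counting and tie rule).
-- Both ports are totalised with fuel; under Pre_helper the fuel is never exhausted.

-- ===== PORT A =====
-- line[n] : Char; Python raises IndexError out of range — the default ' ' is reached only outside Pre_helper
def pvCharAt (s : String) (i : Int) : Char := (PySem.Str.pyGet? s i).getD ' '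
-- int(line[n]) on the one-char string; Python raises ValueError on a non-digit — default 0 reached only outside Pre_helper
def pvIntOfChar (c : Char) : Int := (PySem.Int.ofStr? (String.mk [c])).getD 0

def find_most_common (lines : List String) (n : Int) : Int :=
  let l : Int := lines.length
  let a : Int := lines.foldl (fun a line => a + pvIntOfChar (pvCharAt line n)) 0
  -- 'a >= l/2' on ints is exact as 2*a ≥ l (CPython compares with the exact float l/2)
  if 2 * a ≥ l then 1 else 0

def helperRecA : Nat → List String → Int → Bool → String
  | 0, lines, _, _ => lines.headD ""       -- fuel exhausted: unreachable under Pre_helper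
  | fuel+1, lines, n, common =>
    let digit := find_most_common lines n
    let d : Bool := if common then decide (digit ≠ 0) else ! decide (digit ≠ 0)  -- 'if not common: digit = not digit' + truthiness
    let looking : Char := if d then '1' else '0'
    let x := lines.foldl (fun acc line => if pvCharAt line n = looking then acc ++ [line] else acc) ([] : List String)
    if x.length = 1 then x.headD "" else helperRecA fuel x (n+1) common

def helper (lines : List String) (n : Int) (common : Bool) : String :=
  helperRecA ((((lines.headD "").toList.length : Int) - n).toNat + 1) lines n common

-- ===== PORT B =====
def helperLoopB : Nat → List String → Int → Bool → String
  | 0, cur, _, _ => cur.headD ""           -- fuel exhausted: unreachable under Pre_helper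
  | fuel+1, cur, i, common =>
    if 1 < cur.length then
      let ones : Int := (cur.map (fun line => pvIntOfChar (pvCharAt line i))).sum
      let keep : Bool := decide (2 * ones ≥ (cur.length : Int)) == common       -- (ones >= len(cur)/2) == common
      let looking : Char := if keep then '1' else '0'
      helperLoopB fuel (cur.filter (fun line => pvCharAt line i = looking)) (i+1) common
    else cur.headD ""                       -- cur[0]; outside Pre_helper cur may be empty (IndexError)

def helper_alt (lines : List String) (n : Int) (common : Bool) : String :=
  helperLoopB ((((lines.headD "").toList.length : Int) - n).toNat + 1) lines n common

-- ===== PRECONDITION & SPEC =====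
def BinLine (L : Nat) (s : String) : Prop :=
  (s.toList.length == L && s.toList.all (fun c => c == '0' || c == '1')) = true

-- The 'looking' character of one filtering step: '1'/'0' by the majority rule, flipped when common=False.
def pvLook (lines : List String) (n : Int) (common : Bool) : Char :=
  if (decide (2 * (lines.map (fun s => pvIntOfChar (pvCharAt s n))).sum ≥ (lines.length : Int)) == common) then '1' else '0'

-- One filtering step resolves the input to a single line: every line has a digit at (Python) index n
-- and exactly one line carries the 'looking' character there.
def OneStep (lines : List String) (n : Int) (common : Bool) : Prop :=
  lines ≠ [] ∧
  lines.all (fun s => (PySem.Str.pyGet? s n).any (fun c => c.isDigit)) = true ∧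
  lines.countP (fun s => pvCharAt s n = pvLook lines n common) = 1

-- Suffix-splitting: every group of ≥ 2 lines that agree on positions [i, i+j) contains two lines that
-- disagree at position i+j; this (a condition on the input's shape only) guarantees that no filtering
-- step of the minority rule can ever empty the list.
def SplitN (cur : List String) (i : Nat) : Prop :=
  ∀ s ∈ cur, ∀ j ∈ List.range (s.toList.length - i + 1),
    2 ≤ (cur.filter (fun t => (t.toList.drop i).take j = (s.toList.drop i).take j)).length →
    ∃ t ∈ cur, ∃ u ∈ cur,
      (t.toList.drop i).take j = (s.toList.drop i).take j ∧
      (u.toList.drop i).take j = (s.toList.drop i).take j ∧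
      t.toList[(i+j)]? ≠ u.toList[(i+j)]?

-- A's termination is a whole-trajectory property with no closed form; Pre_helper is the closed-form
-- sufficient (and in practice almost exact) version: inputs resolved in ONE step, or ≥ 2 equal-length
-- binary lines with pairwise-distinct suffixes from n and, when common=False, the suffix-splitting
-- property. This excludes a few inputs on which A still returns — ones whose degenerate group of lines
-- (duplicate suffixes, or a group that cannot split) lies off A's actual trajectory; B returns A's
-- value there too, but equality is not claimed.
def Pre_helper (lines : List String) (n : Int) (common : Bool) : Prop :=
  OneStep lines n common ∨
  (2 ≤ lines.length ∧ 0 ≤ n ∧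
    (∀ s ∈ lines, BinLine (lines.headD "").toList.length s) ∧
    lines.Pairwise (fun s t => s.toList.drop n.toNat ≠ t.toList.drop n.toNat) ∧
    (common = true ∨ SplitN lines n.toNat))

instance (lines : List String) (n : Int) (common : Bool) : Decidable (Pre_helper lines n common) := by
  unfold Pre_helper OneStep BinLine SplitN; infer_instance

def pvWitness_helper : List String × Int × Bool := (["01", "10", "11"], 0, true)

def Spec_helper (lines : List String) (n : Int) (common : Bool) (out : String) : Prop := out = helper_alt lines n common
instance (lines : List String) (n : Int) (common : Bool) (out : String) : Decidable (Spec_helper lines n common out) := by unfold Spec_helper; infer_instance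

-- ===== CLAIM (what is proved, stated in full; the proofs are below) =====
def Claim_equal_helper : Prop := ∀ (lines : List String) (n : Int) (common : Bool), Dom_helper lines n common → Pre_helper lines n common → Spec_helper lines n common (helper lines n common)

-- ===== LEMMAS AND PROOFS =====

theorem binLine_iff (L : Nat) (s : String) :
    BinLine L s ↔ (s.toList.length = L ∧ ∀ c ∈ s.toList, c = '0' ∨ c = '1') := by
  simp [BinLine]

theorem pvIntOfChar_zero : pvIntOfChar '0' = 0 := by decide
theorem pvIntOfChar_one : pvIntOfChar '1' = 1 := by decide

theorem pvCharAt_eq_getElem (s : String) (i : Int) (h0 : 0 ≤ i) (h : i.toNat < s.toList.length) :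
    pvCharAt s i = s.toList[i.toNat] := by
  unfold pvCharAt
  obtain ⟨k, rfl⟩ : ∃ k : Nat, i = (k : Int) := ⟨i.toNat, (Int.toNat_of_nonneg h0).symm⟩
  simp only [Int.toNat_natCast] at h ⊢
  rw [PySem.Str.pyGet?_natCast, List.getElem?_eq_getElem h]
  rfl

theorem sum_bits (cur : List String) (i : Int)
    (hb : ∀ s ∈ cur, pvCharAt s i = '0' ∨ pvCharAt s i = '1') :
    (cur.map (fun line => pvIntOfChar (pvCharAt line i))).sum
      = ((cur.countP (fun line => pvCharAt line i = '1') : Nat) : Int) := by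
  induction cur with
  | nil => simp
  | cons s t ih =>
    have hs := hb s (by simp)
    have ht : ∀ x ∈ t, pvCharAt x i = '0' ∨ pvCharAt x i = '1' := fun x hx => hb x (by simp [hx])
    simp only [List.map_cons, List.sum_cons, List.countP_cons, ih ht]
    rcases hs with h | h <;> simp [h, pvIntOfChar_zero, pvIntOfChar_one] <;> push_cast <;> ring

theorem majority_exists (cur : List String) (i : Int) (hne : cur ≠ [])
    (hb : ∀ s ∈ cur, pvCharAt s i = '0' ∨ pvCharAt s i = '1') :
    ∃ line ∈ cur, pvCharAt line i
      = (if 2 * ((cur.countP (fun line => pvCharAt line i = '1') : Nat) : Int) ≥ (cur.length : Int) then '1' else '0') := by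
  set k := cur.countP (fun line => pvCharAt line i = '1') with hk
  have hl : 1 ≤ cur.length := List.length_pos_iff.mpr hne
  have hkle : k ≤ cur.length := by rw [hk]; exact List.countP_le_length
  split_ifs with h
  · have hkpos : 0 < k := by omega
    obtain ⟨line, hmem, hline⟩ := List.countP_pos_iff.mp hkpos
    exact ⟨line, hmem, by simpa using hline⟩
  · by_contra hno
    push_neg at hno
    have hall : ∀ line ∈ cur, pvCharAt line i = '1' := by
      intro line hm
      rcases hb line hm with h0 | h1
      · exact absurd h0 (hno line hm)
      · exact h1
    have : k = cur.length := by
      rw [hk]; exact List.countP_eq_length.mpr (fun a ha => by simpa using hall a ha)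
    omega

theorem lt_of_pairwise (cur : List String) (i : Int) (L : Nat) (h2 : 2 ≤ cur.length)
    (hb : ∀ s ∈ cur, BinLine L s)
    (hp : cur.Pairwise (fun s t => s.toList.drop i.toNat ≠ t.toList.drop i.toNat))
    (h0 : 0 ≤ i) : i < (L : Int) := by
  match cur, h2 with
  | a :: b :: rest, _ =>
    have hab : a.toList.drop i.toNat ≠ b.toList.drop i.toNat :=
      (List.pairwise_cons.mp hp).1 b (by simp)
    by_contra hge
    push_neg at hge
    have ha : a.toList.length = L := ((binLine_iff _ _).mp (hb a (by simp))).1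
    have hbl : b.toList.length = L := ((binLine_iff _ _).mp (hb b (by simp))).1
    exact hab (by rw [List.drop_eq_nil_of_le (by omega), List.drop_eq_nil_of_le (by omega)])

-- Both bits occur at position i when the splitting property holds and ≥ 2 lines remain.
theorem split_both_bits (cur : List String) (L : Nat) (i : Int) (h0 : 0 ≤ i)
    (h2 : 2 ≤ cur.length) (hb : ∀ s ∈ cur, BinLine L s) (hiL : i < (L : Int))
    (hsp : SplitN cur i.toNat) :
    (∃ t ∈ cur, pvCharAt t i = '0') ∧ (∃ u ∈ cur, pvCharAt u i = '1') := by
  match cur, h2 with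
  | a :: rest, h2m =>
    have ha : a ∈ a :: rest := by simp
    have hfilt : (a :: rest).filter
        (fun t => decide ((t.toList.drop i.toNat).take 0 = (a.toList.drop i.toNat).take 0)) = a :: rest := by
      simp
    obtain ⟨t, ht, u, hu, _, _, hne⟩ :=
      hsp a ha 0 (by simp) (by rw [hfilt]; simpa using h2m)
    have hch : ∀ v ∈ a :: rest, v.toList[(i.toNat + 0)]? = some (pvCharAt v i) := by
      intro v hv
      have hL : v.toList.length = L := ((binLine_iff _ _).mp (hb v hv)).1
      have hlt : i.toNat < v.toList.length := by omega
      rw [pvCharAt_eq_getElem v i h0 hlt]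
      simpa using List.getElem?_eq_getElem hlt
    rw [hch t ht, hch u hu] at hne
    have hnech : pvCharAt t i ≠ pvCharAt u i := by
      intro h; exact hne (by rw [h])
    have hbt : pvCharAt t i = '0' ∨ pvCharAt t i = '1' := by
      have hL : t.toList.length = L := ((binLine_iff _ _).mp (hb t ht)).1
      rw [pvCharAt_eq_getElem t i h0 (by omega)]
      exact ((binLine_iff _ _).mp (hb t ht)).2 _ (List.getElem_mem _)
    have hbu : pvCharAt u i = '0' ∨ pvCharAt u i = '1' := by
      have hL : u.toList.length = L := ((binLine_iff _ _).mp (hb u hu)).1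
      rw [pvCharAt_eq_getElem u i h0 (by omega)]
      exact ((binLine_iff _ _).mp (hb u hu)).2 _ (List.getElem_mem _)
    rcases hbt with h1 | h1 <;> rcases hbu with hc2 | hc2
    · exact absurd (h1.trans hc2.symm) hnech
    · exact ⟨⟨t, ht, h1⟩, ⟨u, hu, hc2⟩⟩
    · exact ⟨⟨u, hu, hc2⟩, ⟨t, ht, h1⟩⟩
    · exact absurd (h1.trans hc2.symm) hnech

-- Filtering by the character at position i preserves the splitting property at i+1.
theorem split_filter (cur : List String) (L : Nat) (i : Int) (c : Char) (h0 : 0 ≤ i)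
    (hb : ∀ s ∈ cur, BinLine L s) (hiL : i < (L : Int))
    (hsp : SplitN cur i.toNat) :
    SplitN (cur.filter (fun line => pvCharAt line i = c)) (i.toNat + 1) := by
  intro s hs j hj hlen2
  have hLen : ∀ t ∈ cur, t.toList.length = L := fun t ht => ((binLine_iff _ _).mp (hb t ht)).1
  have hiN : i.toNat < L := by omega
  have hsmem : s ∈ cur ∧ pvCharAt s i = c := by
    have := List.mem_filter.mp hs
    simpa using this
  have hsL : s.toList.length = L := hLen s hsmem.1
  have hcons : ∀ t ∈ cur, ∀ (hlt : i.toNat < t.toList.length),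
      t.toList.drop i.toNat = t.toList[i.toNat] :: t.toList.drop (i.toNat + 1) :=
    fun t _ hlt => List.drop_eq_getElem_cons hlt
  have hsget : s.toList[i.toNat]'(by omega) = c := by
    rw [← pvCharAt_eq_getElem s i h0 (by omega)]; exact hsmem.2
  have hjle : j + 1 ≤ L - i.toNat := by
    rw [List.mem_range] at hj
    omega
  have hfeq : (cur.filter (fun line => pvCharAt line i = c)).filter
        (fun t => decide ((t.toList.drop (i.toNat + 1)).take j = (s.toList.drop (i.toNat + 1)).take j))
      = cur.filter (fun t => decide ((t.toList.drop i.toNat).take (j+1) = (s.toList.drop i.toNat).take (j+1))) := by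
    rw [List.filter_filter]
    apply List.filter_congr
    intro t ht
    have hlt : i.toNat < t.toList.length := by rw [hLen t ht]; omega
    rw [hcons t ht hlt, hcons s hsmem.1 (by omega), List.take_succ_cons, List.take_succ_cons, hsget]
    rw [← Bool.decide_and, decide_eq_decide, pvCharAt_eq_getElem t i h0 hlt, List.cons.injEq]
    exact and_comm
  rw [hfeq] at hlen2
  obtain ⟨t, ht, u, hu, hts, hus, hne⟩ :=
    hsp s hsmem.1 (j+1) (by rw [List.mem_range]; omega) hlen2
  have hhead : ∀ v ∈ cur, (hv : (v.toList.drop i.toNat).take (j+1) = (s.toList.drop i.toNat).take (j+1)) →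
      pvCharAt v i = c ∧ (v.toList.drop (i.toNat + 1)).take j = (s.toList.drop (i.toNat + 1)).take j := by
    intro v hv hseg
    have hlt : i.toNat < v.toList.length := by rw [hLen v hv]; omega
    rw [hcons v hv hlt, hcons s hsmem.1 (by omega), List.take_succ_cons, List.take_succ_cons, hsget] at hseg
    obtain ⟨h1, h2⟩ := List.cons.inj hseg
    exact ⟨by rw [pvCharAt_eq_getElem v i h0 hlt, h1], h2⟩
  obtain ⟨ht1, ht2⟩ := hhead t ht hts
  obtain ⟨hu1, hu2⟩ := hhead u hu hus
  have hidx : i.toNat + (j+1) = (i.toNat + 1) + j := by omega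
  rw [hidx] at hne
  exact ⟨t, List.mem_filter.mpr ⟨ht, by simpa using ht1⟩,
         u, List.mem_filter.mpr ⟨hu, by simpa using hu1⟩, ht2, hu2, hne⟩

theorem rec_eq_loop (L : Nat) (fuel : Nat) : ∀ (cur : List String) (i : Int) (common : Bool),
    2 ≤ cur.length → 0 ≤ i →
    (∀ s ∈ cur, BinLine L s) →
    cur.Pairwise (fun s t => s.toList.drop i.toNat ≠ t.toList.drop i.toNat) →
    (common = true ∨ SplitN cur i.toNat) →
    (L : Int) - i + 1 ≤ (fuel : Int) →
    helperRecA fuel cur i common = helperLoopB fuel cur i common := by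
  induction fuel with
  | zero =>
    intro cur i common h2 h0 hb hp _hsc hf
    have := lt_of_pairwise cur i L h2 hb hp h0
    omega
  | succ fuel ih =>
    intro cur i common h2 h0 hb hp hsc hf
    have hiL : i < (L : Int) := lt_of_pairwise cur i L h2 hb hp h0
    have hbi : ∀ s ∈ cur, pvCharAt s i = '0' ∨ pvCharAt s i = '1' := by
      intro s hs
      have hL := ((binLine_iff _ _).mp (hb s hs)).1
      have hc := pvCharAt_eq_getElem s i h0 (by omega)
      rw [hc]
      exact ((binLine_iff _ _).mp (hb s hs)).2 _ (List.getElem_mem _)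
    set k := cur.countP (fun line => pvCharAt line i = '1') with hk
    set lookC : Char := (if (decide (2 * ((k : Nat) : Int) ≥ (cur.length : Int)) == common) = true then '1' else '0') with hlookC
    have hsum : (cur.map (fun line => pvIntOfChar (pvCharAt line i))).sum = ((k : Nat) : Int) :=
      sum_bits cur i hbi
    have hfmc : find_most_common cur i = if 2 * ((k : Nat) : Int) ≥ (cur.length : Int) then 1 else 0 := by
      show (if 2 * (cur.foldl (fun a line => a + pvIntOfChar (pvCharAt line i)) 0) ≥ ((cur.length : Nat) : Int) then (1:Int) else 0) = _
      rw [PySem.List.foldl_add, hsum]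
      simp
    set x := cur.filter (fun line => pvCharAt line i = lookC) with hxdef
    have hA : helperRecA (fuel+1) cur i common
        = (if x.length = 1 then x.headD "" else helperRecA fuel x (i+1) common) := by
      show (if ((cur.foldl (fun acc line => if pvCharAt line i = (if (if common then decide (find_most_common cur i ≠ 0) else !decide (find_most_common cur i ≠ 0)) then '1' else '0') then acc ++ [line] else acc) ([]:List String)).length = 1)
            then _ else _) = _
      rw [show (if (if common then decide (find_most_common cur i ≠ 0) else !decide (find_most_common cur i ≠ 0)) then '1' else '0') = lookC by
            rw [hfmc]
            by_cases hcmp : 2 * ((k : Nat) : Int) ≥ (cur.length : Int) <;> cases common <;> simp [hcmp, hlookC]]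
      rw [PySem.List.foldl_append_ite_eq_filter]
      simp [hxdef]
    have hlookB : (if (decide (2 * (cur.map (fun line => pvIntOfChar (pvCharAt line i))).sum ≥ ((cur.length : Nat) : Int)) == common) = true then '1' else '0') = lookC := by
      rw [hsum]
    have hB : helperLoopB (fuel+1) cur i common = helperLoopB fuel x (i+1) common := by
      show (if 1 < cur.length then _ else _) = _
      rw [if_pos (show 1 < cur.length from h2)]
      show helperLoopB fuel (List.filter (fun line => decide (pvCharAt line i = (if (decide (2 * (List.map (fun line => pvIntOfChar (pvCharAt line i)) cur).sum ≥ ((cur.length : Nat) : Int)) == common) = true then '1' else '0'))) cur) (i+1) common = _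
      rw [hlookB]
    have hxne : x ≠ [] := by
      rcases hsc with hct | hsp
      · subst hct
        obtain ⟨line, hmem, hline⟩ := majority_exists cur i (by intro hnil; simp [hnil] at h2) hbi
        intro hnil
        have : line ∈ x := by
          rw [hxdef]
          refine List.mem_filter.mpr ⟨hmem, ?_⟩
          rw [← hk] at hline
          simp [hlookC, ge_iff_le, hline]
        simp [hnil] at this
      · obtain ⟨⟨t0, ht0, hc0⟩, ⟨u1, hu1, hc1⟩⟩ := split_both_bits cur L i h0 h2 hb hiL hsp
        intro hnil
        have hlz : lookC = '0' ∨ lookC = '1' := by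
          rw [hlookC]; split <;> simp
        rcases hlz with hl | hl
        · have : t0 ∈ x := List.mem_filter.mpr ⟨ht0, by simp [hc0, hl]⟩
          simp [hnil] at this
        · have : u1 ∈ x := List.mem_filter.mpr ⟨hu1, by simp [hc1, hl]⟩
          simp [hnil] at this
    rw [hA, hB]
    by_cases hx1 : x.length = 1
    · rw [if_pos hx1]
      cases fuel with
      | zero => rfl
      | succ f =>
        show _ = (if 1 < x.length then _ else _)
        rw [if_neg (by omega)]
    · rw [if_neg hx1]
      have hx2 : 2 ≤ x.length := by
        have : x.length ≠ 0 := by simpa using hxne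
        omega
      apply ih x (i+1) common hx2 (by omega)
      · intro s hs
        exact hb s (List.mem_of_mem_filter hs)
      · have hpx : x.Pairwise (fun s t => s.toList.drop i.toNat ≠ t.toList.drop i.toNat) :=
          hp.sublist List.filter_sublist
        have key : ∀ s ∈ x, s.toList.drop i.toNat = lookC :: s.toList.drop (i.toNat + 1) := by
          intro s hs
          have hmem := List.mem_of_mem_filter hs
          have hcs : pvCharAt s i = lookC := by
            have := (List.mem_filter.mp hs).2
            simpa using this
          have hL := ((binLine_iff _ _).mp (hb s hmem)).1
          have hlt : i.toNat < s.toList.length := by omega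
          rw [List.drop_eq_getElem_cons hlt, ← pvCharAt_eq_getElem s i h0 hlt, hcs]
        refine (List.pairwise_iff_forall_sublist.mpr ?_)
        intro s t hst
        have hrel : s.toList.drop i.toNat ≠ t.toList.drop i.toNat :=
          List.pairwise_iff_forall_sublist.mp hpx hst
        have hs : s ∈ x := hst.subset (by simp)
        have ht : t ∈ x := hst.subset (by simp)
        have h1 : (i+1).toNat = i.toNat + 1 := by omega
        rw [h1]
        intro heq
        exact hrel (by rw [key s hs, key t ht, heq])
      · rcases hsc with hct | hsp
        · exact Or.inl hct
        · refine Or.inr ?_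
          have h1 : (i+1).toNat = i.toNat + 1 := by omega
          rw [h1, hxdef]
          exact split_filter cur L i lookC h0 hb hiL hsp
      · omega

theorem one_step_eq (lines : List String) (n : Int) (common : Bool) (h : OneStep lines n common)
    (fuel : Nat) : helperRecA (fuel+1) lines n common = helperLoopB (fuel+1) lines n common := by
  obtain ⟨hne, hdig, hcount⟩ := h
  have hx1 : (lines.filter (fun s => pvCharAt s n = pvLook lines n common)).length = 1 := by
    rw [← List.countP_eq_length_filter]
    exact hcount
  obtain ⟨w, hw⟩ := List.length_eq_one_iff.mp hx1
  have hAlook : (if (if common then decide (find_most_common lines n ≠ 0) else !decide (find_most_common lines n ≠ 0)) then '1' else '0') = pvLook lines n common := by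
    have hfmc : find_most_common lines n
        = if 2 * (lines.map (fun s => pvIntOfChar (pvCharAt s n))).sum ≥ (lines.length : Int) then 1 else 0 := by
      show (if 2 * (lines.foldl (fun a line => a + pvIntOfChar (pvCharAt line n)) 0) ≥ ((lines.length : Nat) : Int) then (1:Int) else 0) = _
      rw [PySem.List.foldl_add]
      simp
    rw [hfmc]
    by_cases hcmp : 2 * (lines.map (fun s => pvIntOfChar (pvCharAt s n))).sum ≥ (lines.length : Int) <;>
      cases common <;> simp [pvLook, hcmp]
  have hA : helperRecA (fuel+1) lines n common = w := by
    show (if ((lines.foldl (fun acc line => if pvCharAt line n = (if (if common then decide (find_most_common lines n ≠ 0) else !decide (find_most_common lines n ≠ 0)) then '1' else '0') then acc ++ [line] else acc) ([]:List String)).length = 1)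
          then _ else _) = _
    rw [hAlook, PySem.List.foldl_append_ite_eq_filter]
    simp only [List.nil_append]
    rw [hw]
    rfl
  have hB : helperLoopB (fuel+1) lines n common = w := by
    rcases lines with _ | ⟨s, rest⟩
    · exact absurd rfl hne
    rcases rest with _ | ⟨t, rest⟩
    · have hws : w = s := by
        have hmem : w ∈ [s] := List.mem_of_mem_filter (hw ▸ List.mem_singleton_self w)
        simpa using hmem
      show (if 1 < ([s] : List String).length then _ else _) = _
      rw [if_neg (by simp), hws]
      rfl
    · show (if 1 < (s :: t :: rest).length then _ else _) = _
      rw [if_pos (by simp)]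
      show helperLoopB fuel (List.filter (fun line => decide (pvCharAt line n = (if (decide (2 * (List.map (fun line => pvIntOfChar (pvCharAt line n)) (s::t::rest)).sum ≥ (((s::t::rest).length : Nat) : Int)) == common) = true then '1' else '0'))) (s::t::rest)) (n+1) common = _
      rw [show (if (decide (2 * (List.map (fun line => pvIntOfChar (pvCharAt line n)) (s::t::rest)).sum ≥ (((s::t::rest).length : Nat) : Int)) == common) = true then '1' else '0') = pvLook (s::t::rest) n common from rfl]
      rw [hw]
      cases fuel with
      | zero => rfl
      | succ f =>
        show (if 1 < ([w] : List String).length then _ else _) = _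
        rw [if_neg (by simp)]
        rfl
  rw [hA, hB]

-- ===== VERDICT (by name: the statement is the Claim_ definition above) =====
theorem helper_spec : Claim_equal_helper := by
  intro lines n common _hdom hpre
  unfold Spec_helper
  rcases hpre with hone | ⟨h2, h0, hbin, hpw, hsc⟩
  · unfold helper helper_alt
    exact one_step_eq lines n common hone _
  · rcases lines with _ | ⟨s, rest⟩
    · simp at h2
    unfold helper helper_alt
    simp only [List.headD_cons] at hbin ⊢
    exact rec_eq_loop s.toList.length _ _ n common h2 h0 hbin hpw hsc (by omega)
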